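-- pv_equiv track=rewrite | github.com/EdConnorLab/julie | src/analyses/response_window_finder/cusum.py | extract_consecutive_ranges
-- ===== SOURCE A (Python) =====
-- def extract_consecutive_ranges(numbers):
--     """
--     Extracts ranges of consecutive numbers from a list of numbers.
--
--     Parameters:
--     numbers (list): A list of integers.
--
--     Returns:
--     list: A list of tuples, where each tuple contains the first and last consecutive integers from the input list,
--           excluding ranges where the start and end are the same.
--     """
--     result = []
--     if len(numbers) > 0:
--         numbers = sorted(numbers)
--         start = numbers[0]
--         end = numbers[0]
--         for i in range(1, len(numbers)):
--             if numbers[i] == end + 1: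
--                 end = numbers[i]
--             else:
--                 if start != end:  # Only append if start and end are not the same
--                     result.append((start-1, end))
--                 start = end = numbers[i]
--         if start != end:  # Check again for the last range
--             result.append((start-1, end))
--     return result
-- ===== SOURCE B (Python) =====
-- from itertools import groupby
--
-- def extract_consecutive_ranges(numbers):
--     result = []
--     for _, grp in groupby(enumerate(sorted(numbers)), key=lambda p: p[1] - p[0]):
--         vals = [v for _, v in grp]
--         if vals[0] != vals[-1]:
--             result.append((vals[0] - 1, vals[-1]))
--     return result
-- ===== Notes on version B (the rewrite author's own statement) =====
-- stated objective: idiomatic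
-- what changed: Replaces A's hand-maintained (start, end, result) scanning loop with an itertools.groupby over enumerate(sorted(numbers)) keyed by value - index, taking the first and last element of each group.
import Mathlib
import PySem

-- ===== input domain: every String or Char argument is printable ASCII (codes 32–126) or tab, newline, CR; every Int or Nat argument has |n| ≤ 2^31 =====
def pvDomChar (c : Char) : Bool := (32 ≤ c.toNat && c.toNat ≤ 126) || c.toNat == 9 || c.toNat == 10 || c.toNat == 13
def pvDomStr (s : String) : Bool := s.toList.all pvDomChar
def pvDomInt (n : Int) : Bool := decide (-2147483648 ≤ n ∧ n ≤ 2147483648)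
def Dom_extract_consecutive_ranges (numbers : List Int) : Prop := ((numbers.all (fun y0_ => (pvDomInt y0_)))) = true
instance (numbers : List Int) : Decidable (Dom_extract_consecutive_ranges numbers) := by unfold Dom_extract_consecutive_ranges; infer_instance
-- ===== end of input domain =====

-- B replaces A's hand-maintained (start, end, result) scanning loop with an itertools.groupby
-- decomposition (constant key value - index over the enumerated sorted list); objective: idiomatic, same cost.

-- ===== PORT A =====
-- the for-loop of A, state = (start, end, result)
def pvLoopA (start e : Int) (res : List (Int × Int)) : List Int → List (Int × Int)
  | [] => if start ≠ e then res ++ [(start - 1, e)] else res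
  | x :: xs =>
      if x = e + 1 then pvLoopA start x res xs
      else pvLoopA x x (if start ≠ e then res ++ [(start - 1, e)] else res) xs

def extract_consecutive_ranges (numbers : List Int) : List (Int × Int) :=
  match PySem.List.sorted numbers (fun x => x) false with
  | [] => []
  | h :: t => pvLoopA h h [] t

-- ===== PORT B =====
-- one groupby group: consume successors of e (key v - i stays constant ⇔ each value = previous + 1);
-- returns (last value of the group, remaining suffix)
def pvRunB (e : Int) : List Int → Int × List Int
  | [] => (e, [])
  | x :: xs => if x = e + 1 then pvRunB x xs else (e, x :: xs)

theorem pvRunB_len (e : Int) (l : List Int) : (pvRunB e l).2.length ≤ l.length := by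
  induction l generalizing e with
  | nil => simp [pvRunB]
  | cons x xs ih =>
      simp only [pvRunB]
      split
      · exact le_trans (ih x) (Nat.le_succ _)
      · simp

-- the groupby loop: first and last of each group, keep only groups of length > 1
def pvGroupsB : List Int → List (Int × Int)
  | [] => []
  | h :: t =>
      (if h ≠ (pvRunB h t).1 then [(h - 1, (pvRunB h t).1)] else []) ++ pvGroupsB (pvRunB h t).2
  termination_by l => l.length
  decreasing_by exact Nat.lt_succ_of_le (pvRunB_len h t)

def extract_consecutive_ranges_alt (numbers : List Int) : List (Int × Int) :=
  pvGroupsB (PySem.List.sorted numbers (fun x => x) false)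

-- ===== PRECONDITION & SPEC =====
def Spec_extract_consecutive_ranges (numbers : List Int) (out : List (Int × Int)) : Prop := out = extract_consecutive_ranges_alt numbers
instance (numbers : List Int) (out : List (Int × Int)) : Decidable (Spec_extract_consecutive_ranges numbers out) := by unfold Spec_extract_consecutive_ranges; infer_instance

-- ===== CLAIM (what is proved, stated in full; the proofs are below) =====
def Claim_equal_extract_consecutive_ranges : Prop := ∀ (numbers : List Int), Dom_extract_consecutive_ranges numbers → Spec_extract_consecutive_ranges numbers (extract_consecutive_ranges numbers)

-- ===== LEMMAS AND PROOFS =====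

-- A's loop appends to its accumulator only at the end
theorem pvLoopA_acc (t : List Int) : ∀ (start e : Int) (res : List (Int × Int)),
    pvLoopA start e res t = res ++ pvLoopA start e [] t := by
  induction t with
  | nil => intro start e res; simp [pvLoopA]; split <;> simp
  | cons x xs ih =>
      intro start e res
      simp only [pvLoopA]
      split
      · exact ih start x res
      · split
        · rw [ih x x (res ++ [(start - 1, e)]), ih x x ([] ++ [(start - 1, e)])]
          simp
        · exact ih x x res

-- A's loop starting from (start, e) computes the current group via pvRunB, then B's group loop
theorem pvLoopA_eq_groups (t : List Int) : ∀ (start e : Int),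
    pvLoopA start e [] t =
      (if start ≠ (pvRunB e t).1 then [(start - 1, (pvRunB e t).1)] else []) ++ pvGroupsB (pvRunB e t).2 := by
  induction t with
  | nil => intro start e; simp [pvLoopA, pvRunB, pvGroupsB]
  | cons x xs ih =>
      intro start e
      simp only [pvLoopA, pvRunB]
      split
      · exact ih start x
      · rw [pvLoopA_acc, ih x x]
        simp only [pvGroupsB]
        split <;> simp

-- ===== VERDICT (by name: the statement is the Claim_ definition above) =====
theorem extract_consecutive_ranges_spec : Claim_equal_extract_consecutive_ranges := by
  intro numbers _
  unfold Spec_extract_consecutive_ranges extract_consecutive_ranges extract_consecutive_ranges_alt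
  cases h : PySem.List.sorted numbers (fun x => x) false with
  | nil => simp [pvGroupsB]
  | cons a t =>
      show pvLoopA a a [] t = pvGroupsB (a :: t)
      rw [pvLoopA_eq_groups]
      conv_rhs => rw [pvGroupsB]
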